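-- pv_equiv track=rewrite | github.com/DavidFeng0718/BiliBiliHotVideoAnalyze | Spider/old/Pos_sample_v2.py | _unique_capture_key
-- ===== SOURCE A (Python) =====
-- from typing import Any, Dict, List, Optional
--
-- def _unique_capture_key(capture_ts: int, run_id: str, existing_captures: Dict[str, Any]) -> str:
--     """
--     默认用 str(capture_ts) 作为 key。
--     若同一秒重复运行导致冲突，则自动加后缀："<ts>__<run_id>" 或再追加序号。
--     """
--     base = str(capture_ts)
--     if base not in existing_captures:
--         return base
--     k = f"{base}__{run_id}"
--     if k not in existing_captures:
--         return k
--     i = 2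
--     while True:
--         kk = f"{k}__{i}"
--         if kk not in existing_captures:
--             return kk
--         i += 1
-- ===== SOURCE B (Python) =====
-- def _unique_capture_key(capture_ts: int, run_id: str, existing_captures) -> str:
--     # One pass over the dict: classify each key (base / named / suffixed-by-our-prefix),
--     # collecting the suffix strings in a set; then pick the first free slot against that set.
--     base = str(capture_ts)
--     named = f"{base}__{run_id}"
--     prefix = named + "__"
--     base_taken = False
--     named_taken = False
--     sufs = set()
--     for key in existing_captures:
--         if key == base:
--             base_taken = True
--         elif key == named:
--             named_taken = True
--         elif key.startswith(prefix):
--             sufs.add(key[len(prefix):])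
--     if not base_taken:
--         return base
--     if not named_taken:
--         return named
--     i = 2
--     while str(i) in sufs:
--         i += 1
--     return f"{named}__{i}"
-- ===== Notes on version B (the rewrite author's own statement) =====
-- stated objective: alternative
-- what changed: Instead of A's sequence of whole-dict membership probes (base, base__run_id, base__run_id__2, ...), B makes one classifying pass over the dict's keys that records base/named hits and collects the suffix strings behind 'base__run_id__' in a set, then picks the first free slot by testing str(i) against that set.
import Mathlib
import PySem

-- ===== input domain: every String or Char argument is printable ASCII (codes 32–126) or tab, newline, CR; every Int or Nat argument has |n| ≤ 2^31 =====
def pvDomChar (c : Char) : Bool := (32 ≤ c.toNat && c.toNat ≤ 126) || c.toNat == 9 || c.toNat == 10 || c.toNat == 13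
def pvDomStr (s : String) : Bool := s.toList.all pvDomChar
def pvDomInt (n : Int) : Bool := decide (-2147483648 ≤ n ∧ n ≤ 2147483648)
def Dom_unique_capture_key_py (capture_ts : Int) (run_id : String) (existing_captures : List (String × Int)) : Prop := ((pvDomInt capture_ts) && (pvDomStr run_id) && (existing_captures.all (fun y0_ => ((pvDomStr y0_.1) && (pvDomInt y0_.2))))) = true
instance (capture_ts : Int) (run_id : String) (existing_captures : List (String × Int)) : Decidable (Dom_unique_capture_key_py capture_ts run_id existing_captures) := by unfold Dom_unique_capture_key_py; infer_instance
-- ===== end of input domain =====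

-- B replaces A's sequence of whole-dict membership probes by ONE classifying pass over the
-- dict's keys (collecting the suffix strings behind "<base>__<run_id>__" in a set) followed by a
-- first-free-slot search against that set (alternative decomposition; same result).

-- ===== PORT A =====
-- A's 'while True' probe loop. The fuel existing_captures.length + 1 is only a totality guard:
-- the probed candidate strings are pairwise distinct, so at most existing_captures.length of
-- them can be keys of the dict and Python's loop always returns before the fuel runs out;
-- the fuel-0 fallback (the current, untested candidate) is never reached.
def pvALoop (ex : List (String × Int)) (k : String) : Int → Nat → String
  | i, 0 => k ++ "__" ++ PySem.Int.toStr i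
  | i, fuel+1 =>
    let kk := k ++ "__" ++ PySem.Int.toStr i
    if ex.any (fun p => p.1 == kk) then pvALoop ex k (i+1) fuel else kk

def unique_capture_key_py (capture_ts : Int) (run_id : String) (existing_captures : List (String × Int)) : String :=
  let base := PySem.Int.toStr capture_ts
  if !(existing_captures.any (fun p => p.1 == base)) then base
  else
    let k := base ++ "__" ++ run_id
    if !(existing_captures.any (fun p => p.1 == k)) then k
    else pvALoop existing_captures k 2 (existing_captures.length + 1)

-- ===== PORT B =====
-- Source B's single 'for key in existing_captures' classifying pass:
-- (base_taken, named_taken, sufs) with sufs = set of key[len(pfx):] for the suffixed keys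
def pvBScan (base named pfx : String) :
    List (String × Int) → Bool × Bool × PySem.Set String → Bool × Bool × PySem.Set String
  | [], acc => acc
  | (key, _) :: rest, (bt, nt, sufs) =>
    if key == base then pvBScan base named pfx rest (true, nt, sufs)
    else if key == named then pvBScan base named pfx rest (bt, true, sufs)
    else if PySem.Str.startswith key pfx then
      pvBScan base named pfx rest
        (bt, nt, PySem.Set.add sufs (PySem.Str.slice key (some (PySem.Str.len pfx)) none))
    else pvBScan base named pfx rest (bt, nt, sufs)

-- Source B's 'while str(i) in sufs: i += 1'. Fuel is again only a totality guard: sufs holds at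
-- most existing_captures.length distinct strings and str is injective, so the loop stops
-- within existing_captures.length + 1 steps; the fuel-0 fallback is never reached.
def pvBWhile (sufs : PySem.Set String) : Int → Nat → Int
  | i, 0 => i
  | i, fuel+1 => if PySem.Set.contains sufs (PySem.Int.toStr i) then pvBWhile sufs (i+1) fuel else i

def unique_capture_key_py_alt (capture_ts : Int) (run_id : String) (existing_captures : List (String × Int)) : String :=
  let base := PySem.Int.toStr capture_ts
  let named := base ++ "__" ++ run_id
  let pfx := named ++ "__"
  let st := pvBScan base named pfx existing_captures (false, false, PySem.Set.empty)
  if !st.1 then base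
  else if !st.2.1 then named
  else named ++ "__" ++ PySem.Int.toStr (pvBWhile st.2.2 2 (existing_captures.length + 1))

-- ===== PRECONDITION & SPEC =====
def Spec_unique_capture_key_py (capture_ts : Int) (run_id : String) (existing_captures : List (String × Int)) (out : String) : Prop := out = unique_capture_key_py_alt capture_ts run_id existing_captures
instance (capture_ts : Int) (run_id : String) (existing_captures : List (String × Int)) (out : String) : Decidable (Spec_unique_capture_key_py capture_ts run_id existing_captures out) := by unfold Spec_unique_capture_key_py; infer_instance

-- ===== CLAIM (what is proved, stated in full; the proofs are below) =====
def Claim_equal_unique_capture_key_py : Prop := ∀ (capture_ts : Int) (run_id : String) (existing_captures : List (String × Int)), Dom_unique_capture_key_py capture_ts run_id existing_captures → Spec_unique_capture_key_py capture_ts run_id existing_captures (unique_capture_key_py capture_ts run_id existing_captures)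

-- ===== LEMMAS AND PROOFS =====

-- a key that starts with pfx IS pfx ++ (its slice past pfx)
lemma pv_startswith_slice (key p : String) (h : PySem.Str.startswith key p = true) :
    key = p ++ PySem.Str.slice key (some (PySem.Str.len p)) none := by
  apply String.toList_inj.mp
  rw [String.toList_append]
  obtain ⟨t, ht⟩ :=
    (PySem.Chars.startswith_iff key.toList p.toList).mp (by simpa [PySem.Str.startswith] using h)
  have hsl : (PySem.Str.slice key (some (PySem.Str.len p)) none).toList
      = key.toList.drop p.toList.length := by
    simp [PySem.Str.slice, PySem.Str.len_eq, PySem.List.slice_from_natCast]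
  rw [hsl, ← ht, List.drop_left]

-- first component of the scan: 'base seen'
lemma pvBScan_fst (base named pfx : String) :
    ∀ (ex : List (String × Int)) (bt nt : Bool) (sufs : PySem.Set String),
      (pvBScan base named pfx ex (bt, nt, sufs)).1
        = (bt || ex.any (fun p => p.1 == base)) := by
  intro ex
  induction ex with
  | nil => intro bt nt sufs; simp [pvBScan]
  | cons hd tl ih =>
    intro bt nt sufs
    obtain ⟨key, v⟩ := hd
    by_cases h1 : key = base
    · have e1 : (key == base) = true := by simp [h1]
      simp [pvBScan, e1, ih]
    · have e1 : (key == base) = false := by simp [h1]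
      by_cases h2 : key = named
      · have e2 : (key == named) = true := by simp [h2]
        simp [pvBScan, e1, e2, ih]
      · have e2 : (key == named) = false := by simp [h2]
        by_cases h3 : PySem.Str.startswith key pfx = true
        · have e3 : PySem.Chars.startswith key.toList pfx.toList = true := by
            simpa [PySem.Str.startswith] using h3
          simp [pvBScan, e1, e2, e3, ih]
        · have e3 : PySem.Chars.startswith key.toList pfx.toList = false := by
            rw [Bool.eq_false_iff]
            simpa [PySem.Str.startswith] using h3
          simp [pvBScan, e1, e2, e3, ih]

-- second component: 'named seen' (needs base ≠ named so branch 1 cannot hide a named key)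
lemma pvBScan_snd (base named pfx : String) (hbn : base ≠ named) :
    ∀ (ex : List (String × Int)) (bt nt : Bool) (sufs : PySem.Set String),
      (pvBScan base named pfx ex (bt, nt, sufs)).2.1
        = (nt || ex.any (fun p => p.1 == named)) := by
  intro ex
  induction ex with
  | nil => intro bt nt sufs; simp [pvBScan]
  | cons hd tl ih =>
    intro bt nt sufs
    obtain ⟨key, v⟩ := hd
    by_cases h1 : key = base
    · have e1 : (key == base) = true := by simp [h1]
      have e2 : (key == named) = false := by
        simp only [beq_eq_false_iff_ne, ne_eq, h1]; exact hbn
      simp [pvBScan, e1, e2, ih]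
    · have e1 : (key == base) = false := by simp [h1]
      by_cases h2 : key = named
      · have e2 : (key == named) = true := by simp [h2]
        simp [pvBScan, e1, e2, ih]
      · have e2 : (key == named) = false := by simp [h2]
        by_cases h3 : PySem.Str.startswith key pfx = true
        · have e3 : PySem.Chars.startswith key.toList pfx.toList = true := by
            simpa [PySem.Str.startswith] using h3
          simp [pvBScan, e1, e2, e3, ih]
        · have e3 : PySem.Chars.startswith key.toList pfx.toList = false := by
            rw [Bool.eq_false_iff]
            simpa [PySem.Str.startswith] using h3
          simp [pvBScan, e1, e2, e3, ih]

-- third component: s is a collected suffix iff pfx ++ s is a key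
-- (needs: nothing of the form pfx ++ s equals base or named, so branches 1/2 never hide one)
lemma pvBScan_sufs (base named pfx : String)
    (hb : ∀ s : String, pfx ++ s ≠ base) (hn : ∀ s : String, pfx ++ s ≠ named) :
    ∀ (ex : List (String × Int)) (bt nt : Bool) (sufs : PySem.Set String) (s : String),
      (s ∈ (pvBScan base named pfx ex (bt, nt, sufs)).2.2
        ↔ s ∈ sufs ∨ (pfx ++ s) ∈ ex.map Prod.fst) := by
  intro ex
  induction ex with
  | nil => intro bt nt sufs s; simp [pvBScan]
  | cons hd tl ih =>
    intro bt nt sufs s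
    obtain ⟨key, v⟩ := hd
    by_cases h1 : key = base
    · have e1 : (key == base) = true := by simp [h1]
      have hne : ¬ pfx ++ s = key := fun he => hb s (by rw [← h1]; exact he)
      simp [pvBScan, e1, ih, hne]
    · have e1 : (key == base) = false := by simp [h1]
      by_cases h2 : key = named
      · have e2 : (key == named) = true := by simp [h2]
        have hne : ¬ pfx ++ s = key := fun he => hn s (by rw [← h2]; exact he)
        simp [pvBScan, e1, e2, ih, hne]
      · have e2 : (key == named) = false := by simp [h2]
        by_cases h3 : PySem.Str.startswith key pfx = true
        · have hkey := pv_startswith_slice key pfx h3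
          have hiff : pfx ++ s = key
              ↔ s = PySem.Str.slice key (some (PySem.Str.len pfx)) none := by
            constructor
            · intro h
              have h2l := congrArg String.toList (h.trans hkey)
              simp only [String.toList_append] at h2l
              exact String.toList_inj.mp (List.append_cancel_left h2l)
            · intro h; rw [h]; exact hkey.symm
          have e3 : PySem.Chars.startswith key.toList pfx.toList = true := by
            simpa [PySem.Str.startswith] using h3
          simp [pvBScan, e1, e2, e3, ih, PySem.Set.mem_add, hiff]
          tauto
        · have e3 : PySem.Chars.startswith key.toList pfx.toList = false := by
            rw [Bool.eq_false_iff]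
            simpa [PySem.Str.startswith] using h3
          have hne : ¬ pfx ++ s = key := by
            intro h
            rw [Bool.eq_false_iff] at e3
            apply e3
            rw [← h]
            simp [PySem.Chars.startswith_iff, String.toList_append, List.prefix_append]
          simp [pvBScan, e1, e2, e3, ih, hne]

-- the two probe loops agree step for step once their membership tests agree
lemma pv_loops_eq (ex : List (String × Int)) (k : String) (sufs : PySem.Set String)
    (h : ∀ i : Int, ex.any (fun p => p.1 == k ++ "__" ++ PySem.Int.toStr i)
          = PySem.Set.contains sufs (PySem.Int.toStr i)) :
    ∀ (fuel : Nat) (i : Int),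
      pvALoop ex k i fuel = k ++ "__" ++ PySem.Int.toStr (pvBWhile sufs i fuel) := by
  intro fuel
  induction fuel with
  | zero => intro i; simp [pvALoop, pvBWhile]
  | succ n ih =>
    intro i
    by_cases hc : PySem.Int.toStr i ∈ sufs
    · simp [pvALoop, pvBWhile, h i, hc, ih]
    · simp [pvALoop, pvBWhile, h i, hc]

-- ===== VERDICT (by name: the statement is the Claim_ definition above) =====
theorem unique_capture_key_py_spec : Claim_equal_unique_capture_key_py := by
  intro capture_ts run_id ex _dom
  unfold Spec_unique_capture_key_py
  simp only [unique_capture_key_py, unique_capture_key_py_alt]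
  set base := PySem.Int.toStr capture_ts with hbase
  set named := base ++ "__" ++ run_id with hnamed
  have hus : ("__" : String).length = 2 := rfl
  have hlen_named : named.length = base.length + 2 + run_id.length := by
    rw [hnamed]; simp only [String.length_append, hus]
  have hbn : base ≠ named := by
    intro h; have := congrArg String.length h; omega
  have hb : ∀ s : String, (named ++ "__") ++ s ≠ base := by
    intro s h
    have := congrArg String.length h
    simp only [String.length_append, hus] at this
    omega
  have hn : ∀ s : String, (named ++ "__") ++ s ≠ named := by
    intro s h
    have := congrArg String.length h
    simp only [String.length_append, hus] at this
    omega
  have hfst := pvBScan_fst base named (named ++ "__") ex false false PySem.Set.empty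
  have hsnd := pvBScan_snd base named (named ++ "__") hbn ex false false PySem.Set.empty
  have hsufs := pvBScan_sufs base named (named ++ "__") hb hn ex false false PySem.Set.empty
  have hprobe : ∀ i : Int,
      ex.any (fun p => p.1 == named ++ "__" ++ PySem.Int.toStr i)
        = PySem.Set.contains
            (pvBScan base named (named ++ "__") ex (false, false, PySem.Set.empty)).2.2
            (PySem.Int.toStr i) := by
    intro i
    rw [Bool.eq_iff_iff, PySem.Set.contains_iff, hsufs (PySem.Int.toStr i)]
    simp only [PySem.Set.empty, List.not_mem_nil, false_or, List.any_eq_true, beq_iff_eq,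
      List.mem_map]
  rw [hfst, hsnd]
  simp only [Bool.false_or]
  by_cases h1 : ex.any (fun p => p.1 == base) = true
  · by_cases h2 : ex.any (fun p => p.1 == named) = true
    · simp only [h1, h2, Bool.not_true, Bool.false_eq_true, if_false]
      exact pv_loops_eq ex named _ hprobe (ex.length + 1) 2
    · simp [h1, h2]
  · simp [h1]
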